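-- pv_equiv track=rewrite | github.com/ROXER94/Project-Euler | 169/169 - NumberOfWaysNumberExpressedAsASumOfPowersOf2.py | fusc
-- ===== SOURCE A (Python) =====
-- def fusc(n):
-- 	k = n
-- 	a = 1
-- 	b = 0
-- 	while k > 0:
-- 		if k%2 == 0:
-- 			k //= 2
-- 			a += b
-- 		else:
-- 			k = (k-1)//2
-- 			b += a
-- 	return b
-- ===== SOURCE B (Python) =====
-- def fusc(n):
-- 	if n <= 0:
-- 		return 0
-- 	if n == 1:
-- 		return 1
-- 	if n % 2 == 0:
-- 		return fusc(n // 2)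
-- 	return fusc(n // 2) + fusc(n // 2 + 1)
-- ===== Notes on version B (the rewrite author's own statement) =====
-- stated objective: simpler
-- what changed: Replaces A's bottom-up LSB bit-walk with two accumulators by the direct top-down Stern recurrence: halve for even n, sum the values at the two neighbouring halves for odd n.
import Mathlib
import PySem

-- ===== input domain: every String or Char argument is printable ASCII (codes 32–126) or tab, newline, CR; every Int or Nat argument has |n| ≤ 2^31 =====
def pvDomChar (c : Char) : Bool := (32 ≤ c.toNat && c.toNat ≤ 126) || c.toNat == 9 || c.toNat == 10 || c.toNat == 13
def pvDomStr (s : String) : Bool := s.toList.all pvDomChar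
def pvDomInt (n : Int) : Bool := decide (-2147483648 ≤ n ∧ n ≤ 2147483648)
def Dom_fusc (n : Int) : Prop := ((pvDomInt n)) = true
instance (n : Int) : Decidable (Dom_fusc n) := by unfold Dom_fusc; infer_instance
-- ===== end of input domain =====

-- B replaces A's bottom-up LSB bit-walk (two accumulators) by the direct top-down
-- Stern recurrence; objective: simpler (B is not faster).

-- ===== PORT A =====
-- A's while-loop: state (k, a, b), even step k //= 2, a += b; odd step k = (k-1)//2, b += a.
def fuscLoop (k a b : Int) : Int :=
  if hk : k > 0 then
    if PySem.Int.mod k 2 = 0 then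
      fuscLoop (PySem.Int.floordiv k 2) (a + b) b
    else
      fuscLoop (PySem.Int.floordiv (k - 1) 2) a (b + a)
  else b
termination_by k.toNat
decreasing_by
  · rw [PySem.Int.floordiv_eq_ediv_of_pos (by omega)]; omega
  · rw [PySem.Int.floordiv_eq_ediv_of_pos (by omega)]; omega

def fusc (n : Int) : Int := fuscLoop n 1 0

-- ===== PORT B =====
def fusc_alt (n : Int) : Int :=
  if h0 : n ≤ 0 then 0
  else if h1 : n = 1 then 1
  else if PySem.Int.mod n 2 = 0 then
    fusc_alt (PySem.Int.floordiv n 2)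
  else
    fusc_alt (PySem.Int.floordiv n 2) + fusc_alt (PySem.Int.floordiv n 2 + 1)
termination_by n.toNat
decreasing_by
  all_goals
    rw [PySem.Int.floordiv_eq_ediv_of_pos (by omega)]
    simp only [PySem.Int.mod_eq_zero_iff_dvd] at *
    omega

-- ===== PRECONDITION & SPEC =====
def Spec_fusc (n : Int) (out : Int) : Prop := out = fusc_alt n
instance (n : Int) (out : Int) : Decidable (Spec_fusc n out) := by unfold Spec_fusc; infer_instance

-- ===== CLAIM (what is proved, stated in full; the proofs are below) =====
def Claim_equal_fusc : Prop := ∀ (n : Int), Dom_fusc n → Spec_fusc n (fusc n)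

-- ===== LEMMAS AND PROOFS =====

lemma fusc_alt_nonpos {n : Int} (h : n ≤ 0) : fusc_alt n = 0 := by
  rw [fusc_alt]; simp [h]

lemma fusc_alt_one : fusc_alt 1 = 1 := by
  rw [fusc_alt]; norm_num

-- Stern recurrence for fusc_alt at successor of an even split: for m ≥ 0,
-- fusc_alt (2m) = fusc_alt m and fusc_alt (2m+1) = fusc_alt m + fusc_alt (m+1).
lemma fusc_alt_even {m : Int} (hm : 0 < m) : fusc_alt (2 * m) = fusc_alt m := by
  rw [fusc_alt]
  have h2 : ¬ (2 * m ≤ 0) := by omega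
  have h1 : 2 * m ≠ 1 := by omega
  have hmod : PySem.Int.mod (2 * m) 2 = 0 :=
    (PySem.Int.mod_eq_zero_iff_dvd _ _).mpr ⟨m, rfl⟩
  have hdiv : PySem.Int.floordiv (2 * m) 2 = m := by
    rw [PySem.Int.floordiv_eq_ediv_of_pos (by omega)]; omega
  rw [dif_neg h2, dif_neg h1, if_pos hmod, hdiv]

lemma fusc_alt_odd {m : Int} (hm : 0 ≤ m) :
    fusc_alt (2 * m + 1) = fusc_alt m + fusc_alt (m + 1) := by
  rcases eq_or_lt_of_le hm with h | h
  · subst h; simp [fusc_alt_one, fusc_alt_nonpos (le_refl 0)]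
  · rw [fusc_alt]
    have h2 : ¬ (2 * m + 1 ≤ 0) := by omega
    have h1 : 2 * m + 1 ≠ 1 := by omega
    have hmod : PySem.Int.mod (2 * m + 1) 2 ≠ 0 := by
      intro hc
      rcases (PySem.Int.mod_eq_zero_iff_dvd _ _).mp hc with ⟨c, hc'⟩
      omega
    have hdiv : PySem.Int.floordiv (2 * m + 1) 2 = m := by
      rw [PySem.Int.floordiv_eq_ediv_of_pos (by omega)]; omega
    rw [dif_neg h2, dif_neg h1, if_neg hmod, hdiv]

-- Loop invariant: fuscLoop k a b = a * fusc_alt k + b * fusc_alt (k+1) for k ≥ 0.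
lemma fuscLoop_invariant (k a b : Int) (hk : 0 ≤ k) :
    fuscLoop k a b = a * fusc_alt k + b * fusc_alt (k + 1) := by
  induction k, a, b using fuscLoop.induct with
  | case1 k a b hpos hmod ih =>
    rcases (PySem.Int.mod_eq_zero_iff_dvd _ _).mp hmod with ⟨m, hm⟩
    have hdiv : PySem.Int.floordiv k 2 = m := by
      rw [PySem.Int.floordiv_eq_ediv_of_pos (by omega)]; omega
    have hmpos : 0 < m := by omega
    rw [hdiv] at ih
    rw [fuscLoop, dif_pos hpos, if_pos hmod, hdiv, ih (by omega)]
    have he : fusc_alt k = fusc_alt m := by rw [hm]; exact fusc_alt_even hmpos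
    have ho : fusc_alt (k + 1) = fusc_alt m + fusc_alt (m + 1) := by
      rw [hm]; exact fusc_alt_odd (by omega)
    rw [he, ho]; ring
  | case2 k a b hpos hmod ih =>
    have hdvd : ¬ (2 ∣ k) := fun h => hmod ((PySem.Int.mod_eq_zero_iff_dvd _ _).mpr h)
    obtain ⟨m, hm⟩ : ∃ m, k = 2 * m + 1 := ⟨(k - 1) / 2, by omega⟩
    have hdiv : PySem.Int.floordiv (k - 1) 2 = m := by
      rw [PySem.Int.floordiv_eq_ediv_of_pos (by omega)]; omega
    have hmnn : 0 ≤ m := by omega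
    rw [hdiv] at ih
    rw [fuscLoop, dif_pos hpos, if_neg hmod, hdiv, ih hmnn]
    have ho : fusc_alt k = fusc_alt m + fusc_alt (m + 1) := by
      rw [hm]; exact fusc_alt_odd hmnn
    have he : fusc_alt (k + 1) = fusc_alt (m + 1) := by
      have h2 : k + 1 = 2 * (m + 1) := by omega
      rw [h2]; exact fusc_alt_even (by omega)
    rw [ho, he]; ring
  | case3 k a b hpos =>
    have hk0 : k = 0 := by omega
    subst hk0
    rw [fuscLoop]
    simp [fusc_alt_nonpos (le_refl (0 : Int)), fusc_alt_one]

-- ===== VERDICT (by name: the statement is the Claim_ definition above) =====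
theorem fusc_spec : Claim_equal_fusc := by
  intro n _
  unfold Spec_fusc fusc
  by_cases hn : 0 ≤ n
  · rw [fuscLoop_invariant n 1 0 hn]; ring
  · rw [fuscLoop]
    have : ¬ n > 0 := by omega
    simp [this, fusc_alt_nonpos (by omega : n ≤ 0)]
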